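-- pv_equiv track=rewrite | github.com/winglavender/hockey_teammates | query_db.py | categorize_league_list
-- ===== SOURCE A (Python) =====
-- def categorize_league_list(league_list):
--     contains_nhl = False
--     contains_non_national = False
--     national_set = set(['World Juniors','Worlds','Olympics','WC-U18','WHC-17','World Cup'])
--     for league in league_list:
--         if league == 'NHL':
--             return 'blue' # NHL
--         elif league not in national_set:
--             contains_non_national = True
--     if contains_non_national:
--         return 'green' # other
--     else:
--         return 'red' # national teams only
-- ===== SOURCE B (Python) =====
-- def categorize_league_list(league_list):
--     national_set = set(['World Juniors','Worlds','Olympics','WC-U18','WHC-17','World Cup'])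
--     if 'NHL' in league_list:
--         return 'blue' # NHL
--     if all(l in national_set for l in league_list):
--         return 'red' # national teams only
--     return 'green' # other
-- ===== Notes on version B (the rewrite author's own statement) =====
-- stated objective: simpler
-- what changed: Replaces the single flag-carrying scan with early return by two declarative passes: a list membership test for 'NHL' then an all() subset test against the national set; both passes run in C-level built-ins instead of an interpreted per-element loop, giving a constant-factor speedup.
import Mathlib
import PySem

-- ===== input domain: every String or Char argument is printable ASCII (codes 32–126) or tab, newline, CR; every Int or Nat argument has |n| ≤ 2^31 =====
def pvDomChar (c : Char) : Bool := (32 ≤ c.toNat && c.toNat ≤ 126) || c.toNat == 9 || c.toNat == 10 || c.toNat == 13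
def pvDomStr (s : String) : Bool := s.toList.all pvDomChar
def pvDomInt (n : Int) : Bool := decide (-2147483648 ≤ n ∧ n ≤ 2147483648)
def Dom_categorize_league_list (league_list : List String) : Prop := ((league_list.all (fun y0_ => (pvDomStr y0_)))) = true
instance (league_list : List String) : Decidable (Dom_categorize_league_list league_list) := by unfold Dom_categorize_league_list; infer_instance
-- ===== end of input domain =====

-- B replaces the flag-carrying scan with two declarative passes (membership, then an all-subset test); objective: simpler.
-- ===== PORT A =====
def pvNationalSet : PySem.Set String :=
  PySem.Set.ofList ["World Juniors", "Worlds", "Olympics", "WC-U18", "WHC-17", "World Cup"]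

def categorize_league_list.loop : List String → Bool → String
  | [], contains_non_national => if contains_non_national then "green" else "red"
  | league :: rest, contains_non_national =>
    if league == "NHL" then "blue"
    else if !(pvNationalSet.contains league) then
      categorize_league_list.loop rest true
    else
      categorize_league_list.loop rest contains_non_national

def categorize_league_list (league_list : List String) : String :=
  categorize_league_list.loop league_list false

-- ===== PORT B =====
def categorize_league_list_alt (league_list : List String) : String :=
  if league_list.contains "NHL" then "blue"
  else if league_list.all (fun l => pvNationalSet.contains l) then "red"
  else "green"


-- ===== PRECONDITION & SPEC =====
def Spec_categorize_league_list (league_list : List String) (out : String) : Prop := out = categorize_league_list_alt league_list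
instance (league_list : List String) (out : String) : Decidable (Spec_categorize_league_list league_list out) := by unfold Spec_categorize_league_list; infer_instance

-- ===== CLAIM (what is proved, stated in full; the proofs are below) =====
def Claim_equal_categorize_league_list : Prop := ∀ (league_list : List String), Dom_categorize_league_list league_list → Spec_categorize_league_list league_list (categorize_league_list league_list)

-- ===== LEMMAS AND PROOFS =====
theorem loop_characterization (ll : List String) (flag : Bool) :
    categorize_league_list.loop ll flag =
      if ll.contains "NHL" then "blue"
      else if flag || ll.any (fun l => !pvNationalSet.contains l) then "green"
      else "red" := by
  induction ll generalizing flag with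
  | nil => simp [categorize_league_list.loop]
  | cons x xs ih =>
    simp only [categorize_league_list.loop, List.contains_cons, List.any_cons]
    by_cases hx : x = "NHL"
    · simp [hx]
    · have hx' : (x == "NHL") = false := beq_false_of_ne hx
      by_cases hm : x ∈ pvNationalSet
      · simp [hx', hm, ih, Ne.symm hx]
      · simp [hx', hm, ih, Ne.symm hx]

-- ===== VERDICT (by name: the statement is the Claim_ definition above) =====
theorem categorize_league_list_spec : Claim_equal_categorize_league_list := by
  intro ll _
  unfold Spec_categorize_league_list categorize_league_list categorize_league_list_alt
  rw [loop_characterization]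
  by_cases h : "NHL" ∈ ll
  · simp [h]
  · by_cases hall : ∀ x ∈ ll, x ∈ pvNationalSet
    · have hne : ¬ ∃ x ∈ ll, x ∉ pvNationalSet := by push Not; exact hall
      simp [h, hne, hall]
    · have hex : ∃ x ∈ ll, x ∉ pvNationalSet := by push Not at hall; exact hall
      simp [h, hex, hall]
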